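-- pv_equiv track=rewrite | github.com/AnantHandifod/Anant | variable_to_variable_huffman.py python Copy Edit.py | optimal_encoding
-- ===== SOURCE A (Python) =====
-- from typing import List, Dict, Tuple
--
-- def optimal_encoding(data: str, codebook: Dict[str, str], m: int) -> str:
--     n = len(data)
--     dp = [("", 0)] + [("", float('inf'))] * n
--
--     for i in range(1, n+1):
--         for size in range(1, min(m, i) + 1):
--             mgram = data[i-size:i]
--             if mgram in codebook:
--                 candidate = dp[i-size][0] + codebook[mgram]
--                 if len(candidate) < len(dp[i][0]) or dp[i][0] == "":
--                     dp[i] = (candidate, len(candidate))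
--     return dp[n][0]
-- ===== SOURCE B (Python) =====
-- def optimal_encoding(data: str, codebook: dict, m: int) -> str:
--     # Lengths-and-back-pointers DP over only the sizes that occur as codebook key
--     # lengths; the output string is rebuilt once at the end from the back-pointers.
--     n = len(data)
--     lens = sorted({len(k) for k in codebook if len(k) >= 1})
--     L = [0] * (n + 1)
--     bp = [None] * (n + 1)
--     for i in range(1, n + 1):
--         mi = min(m, i)
--         for size in lens:
--             if size <= mi:
--                 mgram = data[i-size:i]
--                 if mgram in codebook:
--                     code = codebook[mgram]
--                     cl = L[i-size] + len(code)
--                     if cl < L[i] or L[i] == 0: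
--                         L[i] = cl
--                         bp[i] = (size, code)
--     parts = []
--     i = n
--     while bp[i] is not None:
--         size, code = bp[i]
--         parts.append(code)
--         i -= size
--     return "".join(reversed(parts))
-- ===== Notes on version B (the rewrite author's own statement) =====
-- stated objective: faster
-- what changed: A stores the full encoding string at every DP prefix and scans every size 1..min(m,i); B stores only integer lengths plus a back-pointer (size, code) per prefix, tries only sizes that occur as codebook key lengths, and rebuilds the output string once at the end.
import Mathlib
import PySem

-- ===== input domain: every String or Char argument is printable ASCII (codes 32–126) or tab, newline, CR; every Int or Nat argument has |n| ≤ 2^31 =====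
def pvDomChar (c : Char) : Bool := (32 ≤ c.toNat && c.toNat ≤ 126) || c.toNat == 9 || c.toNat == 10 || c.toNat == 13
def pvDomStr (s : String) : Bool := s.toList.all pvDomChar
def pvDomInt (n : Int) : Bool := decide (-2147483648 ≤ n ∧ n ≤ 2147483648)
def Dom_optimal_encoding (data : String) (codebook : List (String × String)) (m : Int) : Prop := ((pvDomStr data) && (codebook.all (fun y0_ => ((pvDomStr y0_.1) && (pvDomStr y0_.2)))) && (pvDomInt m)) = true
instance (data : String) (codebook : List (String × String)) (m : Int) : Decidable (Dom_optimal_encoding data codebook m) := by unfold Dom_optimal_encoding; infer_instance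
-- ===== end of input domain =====

-- B replaces A's DP over full encoding strings by a DP over integer lengths with
-- back-pointers, tries only sizes that occur as codebook key lengths, and rebuilds
-- the output string once at the end (measured faster in a timing run).

-- ===== PORT A =====
-- The Python dict `codebook` is the association list; `mgram in codebook` /
-- `codebook[mgram]` is first-match lookup.  The second component of A's dp tuples
-- (0 / float('inf') / len(candidate)) is written but never read by A, so the port
-- keeps only the string component.
def innerA (data : String) (codebook : List (String × String)) (i : Int)
    (dp : List String) (size : Int) : List String :=
  let mgram := PySem.Str.slice data (some (i - size)) (some i)
  match List.lookup mgram codebook with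
  | none => dp
  | some code =>
      let candidate := PySem.List.pyGetD dp (i - size) "" ++ code
      let cur := PySem.List.pyGetD dp i ""
      if PySem.Str.len candidate < PySem.Str.len cur ∨ cur = "" then
        PySem.List.pySetD dp i candidate
      else dp

def optimal_encoding (data : String) (codebook : List (String × String)) (m : Int) : String :=
  let n : Nat := data.toList.length
  let dp : List String := "" :: List.replicate n ""
  let dp := (PySem.List.pyRange 1 ((n : Int) + 1) 1).foldl
      (fun dp i => (PySem.List.pyRange 1 (min m i + 1) 1).foldl (innerA data codebook i) dp) dp
  PySem.List.pyGetD dp (n : Int) ""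

-- ===== PORT B =====
-- sorted({len(k) for k in codebook if len(k) >= 1}) : the candidate m-gram sizes
def keyLens (codebook : List (String × String)) : List Int :=
  PySem.List.sorted
    (PySem.Set.ofList ((codebook.map (fun kv => PySem.Str.len kv.1)).filter (fun l => decide (1 ≤ l))))
    id

-- state = (L, bp): best length per prefix, back-pointer (size, code) per prefix
def innerB (data : String) (codebook : List (String × String)) (i : Int)
    (st : List Int × List (Option (Int × String))) (size : Int) :
    List Int × List (Option (Int × String)) :=
  let mgram := PySem.Str.slice data (some (i - size)) (some i)
  match List.lookup mgram codebook with
  | none => st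
  | some code =>
      let cl := PySem.List.pyGetD st.1 (i - size) 0 + PySem.Str.len code
      let cur := PySem.List.pyGetD st.1 i 0
      if cl < cur ∨ cur = 0 then
        (PySem.List.pySetD st.1 i cl, PySem.List.pySetD st.2 i (some (size, code)))
      else st

-- Source B's while-loop walk along the back-pointers; the fuel argument only makes the
-- loop structurally terminating (fuel n+1 is enough: every stored size is ≥ 1)
def rebuildB (bp : List (Option (Int × String))) : Nat → Int → List String → List String
  | 0, _, parts => parts
  | f+1, i, parts =>
      match PySem.List.pyGetD bp i none with
      | none => parts
      | some (size, code) => rebuildB bp f (i - size) (parts ++ [code])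

def optimal_encoding_alt (data : String) (codebook : List (String × String)) (m : Int) : String :=
  let n : Nat := data.toList.length
  let st : List Int × List (Option (Int × String)) :=
      (List.replicate (n+1) 0, List.replicate (n+1) none)
  let st := (PySem.List.pyRange 1 ((n : Int) + 1) 1).foldl
      (fun st i => (keyLens codebook).foldl
        (fun st size => if size ≤ min m i then innerB data codebook i st size else st) st) st
  PySem.Str.join "" (rebuildB st.2 (n+1) (n : Int) []).reverse

-- ===== PRECONDITION & SPEC =====
def Spec_optimal_encoding (data : String) (codebook : List (String × String)) (m : Int) (out : String) : Prop := out = optimal_encoding_alt data codebook m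
instance (data : String) (codebook : List (String × String)) (m : Int) (out : String) : Decidable (Spec_optimal_encoding data codebook m out) := by unfold Spec_optimal_encoding; infer_instance

-- ===== CLAIM (what is proved, stated in full; the proofs are below) =====
def Claim_equal_optimal_encoding : Prop := ∀ (data : String) (codebook : List (String × String)) (m : Int), Dom_optimal_encoding data codebook m → Spec_optimal_encoding data codebook m (optimal_encoding data codebook m)

-- ===== LEMMAS AND PROOFS =====

-- the encoding string that B's back-pointers at index j denote (fuel-indexed)
def reconstr (bp : List (Option (Int × String))) : Nat → Nat → String
  | 0, _ => ""
  | f+1, j =>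
      match bp.getD j none with
      | none => ""
      | some (s, c) => reconstr bp f (j - s.toNat) ++ c

-- every stored back-pointer size s at index j satisfies 1 ≤ s ≤ j
def validBP (bp : List (Option (Int × String))) : Prop :=
  ∀ j s c, bp.getD j none = some (s, c) → 1 ≤ s ∧ s ≤ (j : Int)

-- the coupling between A's state dp and B's state (L, bp), after outer index i
def InvAB (n i : Nat) (dp : List String) (L : List Int) (bp : List (Option (Int × String))) : Prop :=
  dp.length = n+1 ∧ L.length = n+1 ∧ bp.length = n+1 ∧ validBP bp ∧
  (∀ j, L.getD j 0 = PySem.Str.len (dp.getD j "")) ∧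
  (∀ j, dp.getD j "" = reconstr bp j j) ∧
  (∀ j, i < j → bp.getD j none = none ∧ dp.getD j "" = "")

theorem getD_set_ne {α : Type} (xs : List α) (i j : Nat) (v d : α) (h : i ≠ j) :
    (xs.set i v).getD j d = xs.getD j d := by
  simp [List.getD, List.getElem?_set_ne h]

theorem getD_set_self {α : Type} (xs : List α) (i : Nat) (v d : α) (h : i < xs.length) :
    (xs.set i v).getD i d = v := by
  simp [List.getD, h]

theorem getD_replicate {α : Type} (n j : Nat) (d : α) :
    (List.replicate n d).getD j d = d := by
  simp [List.getD, List.getElem?_replicate]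
  split <;> rfl

theorem str_len_eq_zero (s : String) : PySem.Str.len s = 0 ↔ s = "" := by
  constructor <;> intro h <;> simp_all [PySem.Str.len]

theorem join_empty_nil : PySem.Str.join "" ([] : List String) = "" := by
  rfl

theorem chars_join_nil_cons (c : List Char) (l : List (List Char)) :
    PySem.Chars.join [] (c :: l) = c ++ PySem.Chars.join [] l := by
  cases l <;> simp [PySem.Chars.join, List.intercalate]

theorem join_empty_cons (c : String) (l : List String) :
    PySem.Str.join "" (c :: l) = c ++ PySem.Str.join "" l := by
  have h : (PySem.Str.join "" (c :: l)).toList = (c ++ PySem.Str.join "" l).toList := by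
    simp [PySem.Str.toList_join, chars_join_nil_cons]
  have := congrArg String.ofList h
  simp [String.ofList_toList] at this; exact this

theorem reconstr_fuel (bp : List (Option (Int × String))) (h : validBP bp) :
    ∀ f1 f2 j, j ≤ f1 → j ≤ f2 → reconstr bp f1 j = reconstr bp f2 j := by
  intro f1
  induction f1 with
  | zero =>
      intro f2 j h1 _
      interval_cases j
      cases f2 with
      | zero => rfl
      | succ f2' =>
          simp only [reconstr]
          cases hb : bp.getD 0 none with
          | none => rfl
          | some sc =>
              obtain ⟨s, c⟩ := sc
              have := h 0 s c hb
              omega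
  | succ f1' ih =>
      intro f2 j h1 h2
      cases hb : bp.getD j none with
      | none =>
          cases f2 with
          | zero =>
              have hj : j = 0 := by omega
              subst hj
              simp only [reconstr, hb]
          | succ f2' => simp only [reconstr, hb]
      | some sc =>
          obtain ⟨s, c⟩ := sc
          have hv := h j s c hb
          have hj1 : 1 ≤ j := by omega
          cases f2 with
          | zero => omega
          | succ f2' =>
              simp only [reconstr, hb]
              rw [ih f2' (j - s.toNat) (by omega) (by omega)]

theorem reconstr_set_lt (bp : List (Option (Int × String))) (h : validBP bp)
    (i : Nat) (v : Option (Int × String)) :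
    ∀ f j, j < i → reconstr (bp.set i v) f j = reconstr bp f j := by
  intro f
  induction f with
  | zero => intro j _; rfl
  | succ f ih =>
      intro j hj
      have hne : (bp.set i v).getD j none = bp.getD j none := getD_set_ne bp i j v none (by omega)
      cases hb : bp.getD j none with
      | none => simp only [reconstr, hne, hb]
      | some sc =>
          obtain ⟨s, c⟩ := sc
          have hv := h j s c hb
          simp only [reconstr, hne, hb]
          rw [ih (j - s.toNat) (by omega)]

theorem validBP_set (bp : List (Option (Int × String))) (h : validBP bp)
    (i : Nat) (s : Int) (c : String) (hs : 1 ≤ s ∧ s ≤ (i : Int)) (hi : i < bp.length) :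
    validBP (bp.set i (some (s, c))) := by
  intro j s' c' hj
  by_cases hij : j = i
  · subst hij
    rw [getD_set_self bp j _ none hi] at hj
    cases hj
    exact hs
  · rw [getD_set_ne bp i j _ none (by omega)] at hj
    exact h j s' c' hj

theorem InvAB_mono {n i i' : Nat} (h : i ≤ i') {dp L bp} :
    InvAB n i dp L bp → InvAB n i' dp L bp := by
  rintro ⟨h1, h2, h3, h4, h5, h6, h7⟩
  exact ⟨h1, h2, h3, h4, h5, h6, fun j hj => h7 j (by omega)⟩

theorem InvAB_init (n : Nat) :
    InvAB n 0 ("" :: List.replicate n "") (List.replicate (n+1) 0) (List.replicate (n+1) none) := by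
  have hdp : ∀ j, ("" :: List.replicate n "").getD j "" = "" := by
    intro j
    cases j with
    | zero => rfl
    | succ j' => simp [List.getD, List.getElem?_replicate]; split <;> rfl
  have hbp : ∀ j, (List.replicate (n+1) (none : Option (Int × String))).getD j none = none :=
    fun j => getD_replicate (n+1) j none
  refine ⟨by simp, by simp, by simp, ?_, ?_, ?_, ?_⟩
  · intro j s c hj
    rw [hbp j] at hj
    cases hj
  · intro j
    rw [hdp j, getD_replicate]
    simp [PySem.Str.len]
  · intro j
    rw [hdp j]
    cases j with
    | zero => rfl
    | succ j' => simp only [reconstr, hbp]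
  · intro j _
    exact ⟨hbp j, hdp j⟩

theorem stepAB (data : String) (codebook : List (String × String)) (n i : Nat) (size : Int)
    (hi1 : 1 ≤ i) (hin : i ≤ n) (hs : 1 ≤ size ∧ size ≤ (i : Int))
    (dp : List String) (st : List Int × List (Option (Int × String)))
    (h : InvAB n i dp st.1 st.2) :
    InvAB n i (innerA data codebook (i : Int) dp size)
        (innerB data codebook (i : Int) st size).1
        (innerB data codebook (i : Int) st size).2 := by
  obtain ⟨hdl, hLl, hbl, hval, hLrel, hrec, hhigh⟩ := h
  simp only [innerA, innerB]
  cases hlook : List.lookup (PySem.Str.slice data (some ((i : Int) - size)) (some (i : Int))) codebook with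
  | none => exact ⟨hdl, hLl, hbl, hval, hLrel, hrec, hhigh⟩
  | some code =>
    dsimp only
    have hcast : (i : Int) - size = ((i - size.toNat : Nat) : Int) := by omega
    have g1 : PySem.List.pyGetD dp ((i : Int) - size) "" = dp.getD (i - size.toNat) "" := by
      rw [hcast]; exact PySem.List.pyGetD_natCast dp (i - size.toNat) ""
    have g2 : PySem.List.pyGetD dp (i : Int) "" = dp.getD i "" := PySem.List.pyGetD_natCast dp i ""
    have g3 : PySem.List.pyGetD st.1 ((i : Int) - size) 0 = st.1.getD (i - size.toNat) 0 := by
      rw [hcast]; exact PySem.List.pyGetD_natCast _ (i - size.toNat) 0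
    have g4 : PySem.List.pyGetD st.1 (i : Int) 0 = st.1.getD i 0 := PySem.List.pyGetD_natCast _ i 0
    rw [g1, g2, g3, g4]
    have hclen : st.1.getD (i - size.toNat) 0 + PySem.Str.len code
        = PySem.Str.len (dp.getD (i - size.toNat) "" ++ code) := by
      rw [hLrel (i - size.toNat), PySem.Str.len_append]
    have hcur : st.1.getD i 0 = PySem.Str.len (dp.getD i "") := hLrel i
    have hcond : (st.1.getD (i - size.toNat) 0 + PySem.Str.len code < st.1.getD i 0 ∨ st.1.getD i 0 = 0)
        ↔ (PySem.Str.len (dp.getD (i - size.toNat) "" ++ code) < PySem.Str.len (dp.getD i "")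
            ∨ dp.getD i "" = "") := by
      rw [hclen, hcur, str_len_eq_zero]
    by_cases hc : PySem.Str.len (dp.getD (i - size.toNat) "" ++ code) < PySem.Str.len (dp.getD i "")
        ∨ dp.getD i "" = ""
    · rw [if_pos hc, if_pos (hcond.mpr hc)]
      have sA : PySem.List.pySetD dp (i : Int) (dp.getD (i - size.toNat) "" ++ code)
          = dp.set i (dp.getD (i - size.toNat) "" ++ code) := by
        rw [PySem.List.pySetD_of_nonneg _ _ (by omega)]; simp
      have sL : PySem.List.pySetD st.1 (i : Int) (st.1.getD (i - size.toNat) 0 + PySem.Str.len code)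
          = st.1.set i (st.1.getD (i - size.toNat) 0 + PySem.Str.len code) := by
        rw [PySem.List.pySetD_of_nonneg _ _ (by omega)]; simp
      have sB : PySem.List.pySetD st.2 (i : Int) (some (size, code))
          = st.2.set i (some (size, code)) := by
        rw [PySem.List.pySetD_of_nonneg _ _ (by omega)]; simp
      rw [sA, sL, sB]
      dsimp only
      have hilt : i < dp.length := by omega
      have hiltL : i < st.1.length := by omega
      have hiltB : i < st.2.length := by omega
      have hklt : i - size.toNat < i := by omega
      refine ⟨by simp [hdl], by simp [hLl], by simp [hbl],
        validBP_set st.2 hval i size code hs hiltB, ?_, ?_, ?_⟩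
      · intro j
        by_cases hij : j = i
        · subst hij
          rw [getD_set_self _ _ _ _ hiltL, getD_set_self _ _ _ _ hilt, hclen]
        · rw [getD_set_ne _ _ _ _ _ (by omega), getD_set_ne _ _ _ _ _ (by omega)]
          exact hLrel j
      · intro j
        rcases lt_trichotomy j i with hji | hji | hji
        · rw [getD_set_ne _ _ _ _ _ (by omega), reconstr_set_lt st.2 hval i _ j j hji]
          exact hrec j
        · subst hji
          rw [getD_set_self _ _ _ _ hilt]
          obtain ⟨i', rfl⟩ : ∃ i', j = i' + 1 := ⟨j - 1, by omega⟩
          have hget : (st.2.set (i'+1) (some (size, code))).getD (i'+1) none = some (size, code) :=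
            getD_set_self _ _ _ _ hiltB
          simp only [reconstr, hget]
          rw [reconstr_set_lt st.2 hval (i'+1) _ i' ((i'+1) - size.toNat) (by omega)]
          rw [reconstr_fuel st.2 hval i' ((i'+1) - size.toNat) ((i'+1) - size.toNat) (by omega) le_rfl]
          rw [hrec ((i'+1) - size.toNat)]
        · have hb := (hhigh j hji).1
          have hd := (hhigh j hji).2
          rw [getD_set_ne _ _ _ _ _ (by omega), hd]
          obtain ⟨j', rfl⟩ : ∃ j', j = j' + 1 := ⟨j - 1, by omega⟩
          have hget : (st.2.set i (some (size, code))).getD (j' + 1) none = none := by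
            rw [getD_set_ne _ _ _ _ _ (by omega)]; exact hb
          simp only [reconstr, hget]
      · intro j hj
        rw [getD_set_ne _ _ _ _ _ (by omega), getD_set_ne _ _ _ _ _ (by omega)]
        exact hhigh j hj
    · rw [if_neg hc, if_neg (fun hx => hc (hcond.mp hx))]
      exact ⟨hdl, hLl, hbl, hval, hLrel, hrec, hhigh⟩

theorem innerFold (data : String) (codebook : List (String × String)) (n i : Nat)
    (hi1 : 1 ≤ i) (hin : i ≤ n) :
    ∀ (sizes : List Int), (∀ s ∈ sizes, 1 ≤ s ∧ s ≤ (i : Int)) →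
    ∀ (dp : List String) (st : List Int × List (Option (Int × String))),
      InvAB n i dp st.1 st.2 →
      InvAB n i (sizes.foldl (innerA data codebook (i : Int)) dp)
          (sizes.foldl (innerB data codebook (i : Int)) st).1
          (sizes.foldl (innerB data codebook (i : Int)) st).2 := by
  intro sizes
  induction sizes with
  | nil => intro _ dp st h; exact h
  | cons s rest ih =>
      intro hmem dp st h
      simp only [List.foldl_cons]
      exact ih (fun x hx => hmem x (List.mem_cons_of_mem s hx))
        (innerA data codebook (i : Int) dp s)
        (innerB data codebook (i : Int) st s)
        (stepAB data codebook n i s hi1 hin (hmem s (List.mem_cons_self)) dp st h)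

theorem mem_lookup (mgram code : String) (cb : List (String × String))
    (h : List.lookup mgram cb = some code) : (mgram, code) ∈ cb := by
  induction cb with
  | nil => simp [List.lookup] at h
  | cons kv rest ih =>
      rw [List.lookup_cons] at h
      split at h
      · next heq =>
          cases h
          have := (beq_iff_eq).mp heq
          subst this
          exact List.mem_cons_self
      · exact List.mem_cons_of_mem _ (ih h)

theorem mem_keyLens (cb : List (String × String)) (x : Int) :
    x ∈ keyLens cb ↔ (1 ≤ x ∧ ∃ kv ∈ cb, PySem.Str.len kv.1 = x) := by
  unfold keyLens
  rw [PySem.List.mem_sorted, PySem.Set.mem_ofList, List.mem_filter]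
  simp only [List.mem_map, decide_eq_true_eq]
  constructor
  · rintro ⟨⟨kv, hkv, rfl⟩, h1⟩
    exact ⟨h1, kv, hkv, rfl⟩
  · rintro ⟨h1, kv, hkv, rfl⟩
    exact ⟨⟨kv, hkv, rfl⟩, h1⟩

theorem keyLens_pairwise (cb : List (String × String)) :
    (keyLens cb).Pairwise (· ≤ ·) := by
  simpa using PySem.List.sorted_pairwise
    (PySem.Set.ofList ((cb.map (fun kv => PySem.Str.len kv.1)).filter (fun l => decide (1 ≤ l)))) id

theorem keyLens_nodup (cb : List (String × String)) : (keyLens cb).Nodup := by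
  unfold keyLens
  have hp := PySem.List.sorted_perm
      (PySem.Set.ofList ((cb.map (fun kv => PySem.Str.len kv.1)).filter (fun l => decide (1 ≤ l))))
      (id : Int → Int) false
  exact hp.symm.nodup (PySem.Set.nodup_ofList _)

-- the length of the m-gram data[i-size:i] is exactly size (for 1 ≤ size ≤ i ≤ len data)
theorem len_mgram (data : String) (i : Nat) (size : Int)
    (hs : 1 ≤ size ∧ size ≤ (i : Int)) (hin : i ≤ data.toList.length) :
    PySem.Str.len (PySem.Str.slice data (some ((i : Int) - size)) (some (i : Int))) = size := by
  have hcast : (i : Int) - size = ((i - size.toNat : Nat) : Int) := by omega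
  rw [PySem.Str.len_eq]
  have htl : (PySem.Str.slice data (some ((i : Int) - size)) (some (i : Int))).toList
      = PySem.List.slice data.toList (some ((i : Int) - size)) (some (i : Int)) :=
    PySem.Str.toList_slice data _ _
  rw [htl, hcast, PySem.List.length_slice, PySem.List.clampIdx_natCast, PySem.List.clampIdx_natCast]
  omega

-- a size that is not a key length cannot match, so A's inner step is a no-op there
theorem innerA_skip (data : String) (cb : List (String × String)) (i : Nat) (size : Int)
    (hs : 1 ≤ size ∧ size ≤ (i : Int)) (hin : i ≤ data.toList.length)
    (hno : size ∉ keyLens cb) (dp : List String) :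
    innerA data cb (i : Int) dp size = dp := by
  simp only [innerA]
  cases hl : List.lookup (PySem.Str.slice data (some ((i : Int) - size)) (some (i : Int))) cb with
  | none => rfl
  | some code =>
      exfalso
      apply hno
      rw [mem_keyLens]
      refine ⟨hs.1, ⟨_, mem_lookup _ _ _ hl, ?_⟩⟩
      exact len_mgram data i size hs hin

-- A's full size range filtered to the key lengths = the key lengths filtered to the range
theorem keyLens_filter_eq (cb : List (String × String)) (mi : Int) :
    (PySem.List.pyRange 1 (mi + 1) 1).filter (fun s => decide (s ∈ keyLens cb))
      = (keyLens cb).filter (fun s => decide (s ≤ mi)) := by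
  apply List.Perm.eq_of_pairwise (le := (· ≤ ·))
  · intro a b _ _ hab hba
    omega
  · exact List.Pairwise.filter _
      ((PySem.List.pairwise_lt_pyRange_one 1 (mi + 1)).imp (fun h => le_of_lt h))
  · exact List.Pairwise.filter _ (keyLens_pairwise cb)
  · rw [List.perm_ext_iff_of_nodup
      (List.Nodup.filter _ (PySem.List.nodup_pyRange_one 1 (mi + 1)))
      (List.Nodup.filter _ (keyLens_nodup cb))]
    intro a
    rw [List.mem_filter, List.mem_filter, PySem.List.mem_pyRange_one]
    constructor
    · rintro ⟨⟨h1, h2⟩, h3⟩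
      simp only [decide_eq_true_eq] at h3 ⊢
      exact ⟨h3, by omega⟩
    · rintro ⟨h1, h2⟩
      simp only [decide_eq_true_eq] at h1 h2 ⊢
      have := (mem_keyLens cb a).mp h1
      exact ⟨⟨this.1, by omega⟩, h1⟩

theorem innerFoldKL (data : String) (codebook : List (String × String)) (m : Int) (n i : Nat)
    (hi1 : 1 ≤ i) (hin : i ≤ n) (hdata : n = data.toList.length)
    (dp : List String) (st : List Int × List (Option (Int × String)))
    (h : InvAB n i dp st.1 st.2) :
    InvAB n i
      ((PySem.List.pyRange 1 (min m (i : Int) + 1) 1).foldl (innerA data codebook (i : Int)) dp)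
      ((keyLens codebook).foldl
        (fun st size => if size ≤ min m (i : Int) then innerB data codebook (i : Int) st size else st) st).1
      ((keyLens codebook).foldl
        (fun st size => if size ≤ min m (i : Int) then innerB data codebook (i : Int) st size else st) st).2 := by
  have hminr : min m (i : Int) ≤ (i : Int) := min_le_right m (i : Int)
  have hA : (PySem.List.pyRange 1 (min m (i : Int) + 1) 1).foldl (innerA data codebook (i : Int)) dp
      = ((keyLens codebook).filter (fun s => decide (s ≤ min m (i : Int)))).foldl
          (innerA data codebook (i : Int)) dp := by
    rw [← keyLens_filter_eq codebook (min m (i : Int)), List.foldl_filter]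
    apply PySem.List.foldl_congr_mem
    intro acc x hx
    rw [PySem.List.mem_pyRange_one] at hx
    by_cases hmem : x ∈ keyLens codebook
    · simp [hmem]
    · simp only [hmem, decide_false, Bool.false_eq_true, if_false]
      exact innerA_skip data codebook i x ⟨hx.1, by omega⟩ (by omega) hmem acc
  have hB : (keyLens codebook).foldl
      (fun st size => if size ≤ min m (i : Int) then innerB data codebook (i : Int) st size else st) st
      = ((keyLens codebook).filter (fun s => decide (s ≤ min m (i : Int)))).foldl
          (innerB data codebook (i : Int)) st := by
    rw [List.foldl_filter]
    apply PySem.List.foldl_congr_mem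
    intro acc x _
    by_cases hle : x ≤ min m (i : Int) <;> simp [hle]
  rw [hA, hB]
  apply innerFold data codebook n i hi1 hin _ _ dp st h
  intro s hsmem
  rw [List.mem_filter] at hsmem
  have h1 := (mem_keyLens codebook s).mp hsmem.1
  have h2 := hsmem.2
  simp only [decide_eq_true_eq] at h2
  exact ⟨h1.1, by omega⟩

theorem outerFold (data : String) (codebook : List (String × String)) (m : Int) (n : Nat)
    (hdata : n = data.toList.length)
    (dp0 : List String) (st0 : List Int × List (Option (Int × String)))
    (h0 : InvAB n 0 dp0 st0.1 st0.2) :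
    ∀ k, k ≤ n →
      InvAB n k
        ((PySem.List.pyRange 1 ((k : Int) + 1) 1).foldl
          (fun dp i => (PySem.List.pyRange 1 (min m i + 1) 1).foldl (innerA data codebook i) dp) dp0)
        ((PySem.List.pyRange 1 ((k : Int) + 1) 1).foldl
          (fun st i => (keyLens codebook).foldl
            (fun st size => if size ≤ min m i then innerB data codebook i st size else st) st) st0).1
        ((PySem.List.pyRange 1 ((k : Int) + 1) 1).foldl
          (fun st i => (keyLens codebook).foldl
            (fun st size => if size ≤ min m i then innerB data codebook i st size else st) st) st0).2 := by
  intro k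
  induction k with
  | zero =>
      intro _
      rw [show ((0 : Nat) : Int) + 1 = 1 by norm_num, PySem.List.pyRange_one_eq_nil le_rfl]
      simpa using h0
  | succ k ih =>
      intro hk
      have hk' : k ≤ n := by omega
      have hone : ((k + 1 : Nat) : Int) + 1 = ((k : Int) + 1) + 1 := by push_cast; ring
      rw [hone, PySem.List.pyRange_one_succ_right (by omega), List.foldl_append, List.foldl_append]
      simp only [List.foldl_cons, List.foldl_nil]
      have hcast : (k : Int) + 1 = ((k + 1 : Nat) : Int) := by push_cast; ring
      rw [hcast]
      exact innerFoldKL data codebook m n (k+1) (by omega) hk hdata _ _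
        (InvAB_mono (by omega) (ih hk'))

theorem rebuild_join (bp : List (Option (Int × String))) (h : validBP bp) :
    ∀ f (j : Nat) parts,
      PySem.Str.join "" (rebuildB bp f (j : Int) parts).reverse
        = reconstr bp f j ++ PySem.Str.join "" parts.reverse := by
  intro f
  induction f with
  | zero =>
      intro j parts
      simp only [rebuildB, reconstr]
      rw [String.empty_append]
  | succ f ih =>
      intro j parts
      have hget : PySem.List.pyGetD bp ((j : Nat) : Int) none = bp.getD j none :=
        PySem.List.pyGetD_natCast bp j none
      cases hb : bp.getD j none with
      | none =>
          simp only [rebuildB, reconstr, hget, hb]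
          rw [String.empty_append]
      | some sc =>
          obtain ⟨s, c⟩ := sc
          have hv := h j s c hb
          have hcast : (j : Int) - s = ((j - s.toNat : Nat) : Int) := by omega
          simp only [rebuildB, reconstr, hget, hb, hcast]
          rw [ih (j - s.toNat) (parts ++ [c])]
          rw [List.reverse_append, List.reverse_singleton, List.singleton_append,
              join_empty_cons, String.append_assoc]

-- ===== VERDICT (by name: the statement is the Claim_ definition above) =====
theorem optimal_encoding_spec : Claim_equal_optimal_encoding := by
  intro data codebook m _
  unfold Spec_optimal_encoding optimal_encoding optimal_encoding_alt
  dsimp only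
  have H := outerFold data codebook m data.toList.length rfl
      ("" :: List.replicate data.toList.length "")
      (List.replicate (data.toList.length + 1) 0, List.replicate (data.toList.length + 1) none)
      (InvAB_init data.toList.length) data.toList.length le_rfl
  obtain ⟨hdl, hLl, hbl, hval, hLrel, hrec, hhigh⟩ := H
  rw [PySem.List.pyGetD_natCast, hrec data.toList.length]
  rw [rebuild_join _ hval (data.toList.length + 1) data.toList.length []]
  rw [List.reverse_nil, join_empty_nil, String.append_empty]
  exact reconstr_fuel _ hval data.toList.length (data.toList.length + 1) data.toList.length le_rfl (by omega)
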